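-- pv_equiv track=rewrite | github.com/lixasman/QMT | backtest/adapters.py | _normalize_freeze_reason
-- ===== SOURCE A (Python) =====
-- def _normalize_freeze_reason(reason: str) -> str:
--     out = str(reason or "").strip()
--     while out.lower().startswith("frozen:"):
--         out = str(out.split(":", 1)[1] if ":" in out else "").strip()
--     if not out:
--         out = "UNKNOWN_FREEZE_REASON"
--     if len(out) > 240:
--         out = f"{out[:240]}..."
--     return str(out)
-- ===== SOURCE B (Python) =====
-- def _normalize_freeze_reason(reason: str) -> str:
--     parts = str(reason or "").split(":")
--     k = next((i for i, p in enumerate(parts[:-1]) if p.lstrip().lower() != "frozen"),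
--              len(parts) - 1)
--     out = ":".join(parts[k:]).strip()
--     if not out:
--         out = "UNKNOWN_FREEZE_REASON"
--     return out[:240] + "..." if len(out) > 240 else out
-- ===== Notes on version B (the rewrite author's own statement) =====
-- stated objective: alternative
-- what changed: A repeatedly strips, lowercases and re-splits the remaining string with split(':',1) in a while loop; B splits the whole string at every colon exactly once up front, counts how many leading segments lstrip/lower to 'frozen', and rejoins the remaining segments with a single final strip.
import Mathlib
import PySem

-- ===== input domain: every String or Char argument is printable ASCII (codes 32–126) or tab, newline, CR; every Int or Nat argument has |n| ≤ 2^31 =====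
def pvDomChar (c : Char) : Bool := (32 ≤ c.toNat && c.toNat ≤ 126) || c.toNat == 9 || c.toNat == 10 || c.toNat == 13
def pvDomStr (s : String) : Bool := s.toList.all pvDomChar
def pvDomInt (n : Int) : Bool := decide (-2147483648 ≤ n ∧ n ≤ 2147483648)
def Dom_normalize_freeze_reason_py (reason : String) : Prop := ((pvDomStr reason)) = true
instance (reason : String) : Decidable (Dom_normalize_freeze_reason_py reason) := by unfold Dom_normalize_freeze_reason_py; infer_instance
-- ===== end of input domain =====

-- B splits the string at every colon once, counts the leading segments that lstrip/lower to
-- "frozen", and rejoins the rest with one final strip — instead of A's strip/lower/re-split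
-- while loop (objective: alternative).

-- ===== PORT A =====
-- helper lemmas the port needs for termination (cited by name in decreasing_by)

theorem pv_isspace_of_lower (c d : Char) (h : PySem.Chars.lowerChar c = d)
    (hd : PySem.Chars.isspace d = false) : PySem.Chars.isspace c = false := by
  unfold PySem.Chars.lowerChar at h
  split_ifs at h with hu
  · have hb : 'A' ≤ c ∧ c ≤ 'Z' := by simpa [PySem.Chars.isupper] using hu
    have hb' : 65 ≤ c.toNat ∧ c.toNat ≤ 90 := by
      obtain ⟨h1, h2⟩ := hb
      exact ⟨h1, h2⟩
    simp only [PySem.Chars.isspace]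
    simp only [Bool.or_eq_false_iff, Bool.and_eq_false_iff, decide_eq_false_iff_not]
    omega
  · rw [h]; exact hd

-- `u` whose first 7 chars lower to "frozen:" decomposes as 6 non-colon chars, ':', rest;
-- all 7 are non-whitespace.
theorem pv_decomp7 (u : List Char)
    (h : "frozen:".toList <+: PySem.Chars.lower u) :
    ∃ p tail, u = p ++ ':' :: tail ∧ p.length = 6 ∧
      (∀ c ∈ p ++ [':'], PySem.Chars.isspace c = false) ∧ ':' ∉ p := by
  obtain ⟨t', ht⟩ := h
  rw [show "frozen:".toList = ['f','r','o','z','e','n',':'] from by decide] at ht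
  rcases u with _ | ⟨a, _ | ⟨b, _ | ⟨c, _ | ⟨d, _ | ⟨e, _ | ⟨f, _ | ⟨g, t⟩⟩⟩⟩⟩⟩⟩ <;>
    simp [PySem.Chars.lower] at ht
  obtain ⟨ha, hb, hc, hd, he, hf, hg, -⟩ := ht
  have hg' : g = ':' := by
    unfold PySem.Chars.lowerChar at hg
    split_ifs at hg with hu
    · exfalso
      have hb1 : 'A' ≤ g ∧ g ≤ 'Z' := by simpa [PySem.Chars.isupper] using hu
      have h1 : 65 ≤ g.toNat ∧ g.toNat ≤ 90 := ⟨hb1.1, hb1.2⟩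
      have h2 : (Char.ofNat (g.toNat + 32)).toNat = g.toNat + 32 := by
        have hv : (g.toNat + 32).isValidChar := by
          constructor
          omega
        simp [Char.ofNat, hv]
      rw [← hg] at h2
      simp at h2
      omega
    · exact hg.symm
  refine ⟨[a, b, c, d, e, f], t, by simp [hg'], rfl, ?_, ?_⟩
  · intro x hx
    simp only [List.mem_append, List.mem_cons, List.not_mem_nil, or_false] at hx
    rcases hx with (h | h | h | h | h | h) | h <;> rw [h]
    · exact pv_isspace_of_lower a 'f' ha.symm (by decide)
    · exact pv_isspace_of_lower b 'r' hb.symm (by decide)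
    · exact pv_isspace_of_lower c 'o' hc.symm (by decide)
    · exact pv_isspace_of_lower d 'z' hd.symm (by decide)
    · exact pv_isspace_of_lower e 'e' he.symm (by decide)
    · exact pv_isspace_of_lower f 'n' hf.symm (by decide)
    · decide
  · intro hx
    simp only [List.mem_cons, List.not_mem_nil, or_false] at hx
    rcases hx with h | h | h | h | h | h
    · rw [← h] at ha; exact absurd ha (by decide)
    · rw [← h] at hb; exact absurd hb (by decide)
    · rw [← h] at hc; exact absurd hc (by decide)
    · rw [← h] at hd; exact absurd hd (by decide)
    · rw [← h] at he; exact absurd he (by decide)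
    · rw [← h] at hf; exact absurd hf (by decide)

-- take-7 form ↔ prefix form of the "frozen:" condition
theorem pv_take7_iff (u : List Char) :
    PySem.Chars.lower (u.take 7) = "frozen:".toList ↔ "frozen:".toList <+: PySem.Chars.lower u := by
  constructor
  · intro h
    refine ⟨PySem.Chars.lower (u.drop 7), ?_⟩
    rw [← h]
    simp only [PySem.Chars.lower, ← List.map_append, List.take_append_drop]
  · intro h
    obtain ⟨t', ht⟩ := h
    simp only [PySem.Chars.lower] at ht
    simp only [PySem.Chars.lower, List.map_take]
    rw [← ht, List.take_left' (by decide)]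

-- A's loop condition in its startswith form
theorem pv_cond_iff (v : List Char) :
    PySem.Chars.startswith (PySem.Chars.lower v) "frozen:".toList = true ↔
      PySem.Chars.lower (v.take 7) = "frozen:".toList := by
  rw [PySem.Chars.startswith_iff, pv_take7_iff]

-- characterization of CPython's str.split(":", 1) on a string with a known first colon
theorem pv_go_mzero (fuel : Nat) (suf cur : List Char) (acc : List (List Char))
    (h : suf.length + 1 ≤ fuel) :
    PySem.Chars.splitOnMax.go [':'] fuel 0 suf cur acc = ((cur.reverse ++ suf) :: acc).reverse := by
  match fuel, h with
  | f + 1, _ => cases suf <;> simp [PySem.Chars.splitOnMax.go]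

theorem pv_go_run (p : List Char) (hp : ':' ∉ p) :
    ∀ (suf cur : List Char) (acc : List (List Char)) (fuel : Nat),
      p.length + suf.length + 2 ≤ fuel →
      PySem.Chars.splitOnMax.go [':'] fuel 1 (p ++ ':' :: suf) cur acc =
        (suf :: (cur.reverse ++ p) :: acc).reverse := by
  induction p with
  | nil =>
    intro suf cur acc fuel h
    match fuel, h with
    | f + 1, h =>
      simp only [List.nil_append, PySem.Chars.splitOnMax.go]
      rw [if_neg (by omega), if_pos (by simp [List.isPrefixOf])]
      simp only [List.length_nil, List.length_cons, List.drop_succ_cons, List.drop_zero,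
        Nat.sub_self]
      rw [pv_go_mzero f suf [] _ (by simp at h ⊢; omega)]
      simp
  | cons c p ih =>
    intro suf cur acc fuel h
    have hc : c ≠ ':' := fun hcc => hp (by simp [hcc])
    match fuel, h with
    | f + 1, h =>
      simp only [List.cons_append, PySem.Chars.splitOnMax.go]
      rw [if_neg (by omega), if_neg (by simp [List.isPrefixOf]; exact fun hcc => absurd hcc.symm hc)]
      rw [ih (fun hx => hp (by simp [hx])) suf (c :: cur) acc f (by simp at h ⊢; omega)]
      simp

theorem pv_splitOnMax_colon (p suf : List Char) (hp : ':' ∉ p) :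
    PySem.Chars.splitOnMax (p ++ ':' :: suf) [':'] 1 = [p, suf] := by
  unfold PySem.Chars.splitOnMax
  rw [if_neg (by omega)]
  rw [show (1 : Int).toNat = 1 from rfl]
  rw [pv_go_run p hp suf [] [] _ (by simp)]
  simp

-- A's loop body simplifies to strip (v.drop 7) when the condition holds
theorem pv_aStep (v : List Char) (h : PySem.Chars.lower (v.take 7) = "frozen:".toList) :
    (if PySem.Chars.isIn [':'] v then (PySem.Chars.splitOnMax v [':'] 1).getD 1 [] else []) =
      v.drop 7 ∧ 7 ≤ v.length := by
  obtain ⟨p, tail, rfl, hp6, hns, hpc⟩ := pv_decomp7 v ((pv_take7_iff v).mp h)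
  constructor
  · rw [if_pos ((PySem.Chars.isIn_iff_infix _ _).mpr ⟨p, tail, by simp⟩)]
    rw [pv_splitOnMax_colon p tail hpc]
    rw [show p ++ ':' :: tail = (p ++ [':']) ++ tail from by simp]
    rw [List.drop_left' (by simp [hp6])]
    rfl
  · simp [hp6]
    omega

theorem pv_strip_length_le (x : List Char) : (PySem.Chars.strip x).length ≤ x.length := by
  simp only [PySem.Chars.strip, PySem.Chars.rstrip, PySem.Chars.lstrip, List.length_reverse]
  calc (List.dropWhile PySem.Chars.isspace (List.dropWhile PySem.Chars.isspace x).reverse).length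
      ≤ (List.dropWhile PySem.Chars.isspace x).reverse.length := List.length_dropWhile_le _ _
    _ ≤ x.length := by rw [List.length_reverse]; exact List.length_dropWhile_le _ _

def pvALoop (out : List Char) : List Char :=
  if h : PySem.Chars.startswith (PySem.Chars.lower out) "frozen:".toList = true then
    pvALoop (PySem.Chars.strip
      (if PySem.Chars.isIn [':'] out then (PySem.Chars.splitOnMax out [':'] 1).getD 1 [] else []))
  else out
termination_by out.length
decreasing_by
  have h7 := (pv_cond_iff out).mp h
  obtain ⟨hstep, hlen⟩ := pv_aStep out h7
  rw [dite_eq_ite, hstep]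
  have := pv_strip_length_le (out.drop 7)
  simp only [List.length_drop] at this
  omega

-- `str(reason or "")` is `reason` for a str argument; strings ported as code-point lists.
def normalize_freeze_reason_py (reason : String) : String :=
  let out := PySem.Chars.strip reason.toList
  let out := pvALoop out
  let out := if out = [] then "UNKNOWN_FREEZE_REASON".toList else out
  String.ofList (if 240 < out.length then PySem.Chars.slice out none (some 240) ++ "...".toList else out)

-- ===== PORT B =====
-- parts = reason.split(":"); k = first index in parts[:-1] whose lstrip().lower() ≠ "frozen"
-- (List.findIdx returns the list's length when no element matches, = Python's next(…, len(parts)-1));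
-- out = ":".join(parts[k:]).strip(), then the same fallback and truncation.
def normalize_freeze_reason_py_alt (reason : String) : String :=
  let parts := PySem.Chars.splitOn reason.toList [':']
  let k := List.findIdx
    (fun p => !(PySem.Chars.lower (PySem.Chars.lstrip p) == "frozen".toList)) parts.dropLast
  let out := PySem.Chars.strip (PySem.Chars.join [':'] (parts.drop k))
  let out := if out = [] then "UNKNOWN_FREEZE_REASON".toList else out
  String.ofList (if 240 < out.length then PySem.Chars.slice out none (some 240) ++ "...".toList else out)

-- ===== PRECONDITION & SPEC =====
def Spec_normalize_freeze_reason_py (reason : String) (out : String) : Prop := out = normalize_freeze_reason_py_alt reason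
instance (reason : String) (out : String) : Decidable (Spec_normalize_freeze_reason_py reason out) := by unfold Spec_normalize_freeze_reason_py; infer_instance

-- ===== CLAIM (what is proved, stated in full; the proofs are below) =====
def Claim_equal_normalize_freeze_reason_py : Prop := ∀ (reason : String), Dom_normalize_freeze_reason_py reason → Spec_normalize_freeze_reason_py reason (normalize_freeze_reason_py reason)

-- ===== LEMMAS AND PROOFS =====

theorem pv_rstrip_decomp (u : List Char) :
    ∃ w, u = PySem.Chars.rstrip u ++ w ∧ ∀ c ∈ w, PySem.Chars.isspace c = true := by
  refine ⟨(u.reverse.takeWhile PySem.Chars.isspace).reverse, ?_, ?_⟩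
  · conv_lhs => rw [← u.reverse_reverse,
      ← List.takeWhile_append_dropWhile (p := PySem.Chars.isspace) (l := u.reverse)]
    rw [List.reverse_append]
    rfl
  · intro c hc
    rw [List.mem_reverse] at hc
    exact List.mem_takeWhile_imp hc

theorem pv_rstrip_append (xs ys : List Char) (h : PySem.Chars.rstrip xs = xs) :
    PySem.Chars.rstrip (xs ++ ys) = xs ++ PySem.Chars.rstrip ys := by
  simp only [PySem.Chars.rstrip, List.reverse_append, List.dropWhile_append] at h ⊢
  split_ifs with he
  · rw [List.isEmpty_iff] at he
    rw [he]
    simp [h]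
  · simp

theorem pv_strip_rstrip (x : List Char) :
    PySem.Chars.strip (PySem.Chars.rstrip x) = PySem.Chars.strip x := by
  obtain ⟨w, hx, hw⟩ := pv_rstrip_decomp x
  have key : ∀ (y w' : List Char), (∀ c ∈ w', PySem.Chars.isspace c = true) →
      PySem.Chars.strip (y ++ w') = PySem.Chars.strip y := by
    intro y w' hw'
    simp only [PySem.Chars.strip, PySem.Chars.lstrip, List.dropWhile_append]
    split_ifs with he
    · rw [List.isEmpty_iff] at he
      rw [he, List.dropWhile_eq_nil_iff.mpr hw']
    · simp only [PySem.Chars.rstrip, List.reverse_append, List.dropWhile_append]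
      rw [if_pos]
      simp only [List.isEmpty_iff, List.dropWhile_eq_nil_iff]
      intro c hc
      exact hw' c (by simpa using hc)
  conv_rhs => rw [hx]
  rw [key _ _ hw]

theorem pv_strip_sublist (x : List Char) : List.Sublist (PySem.Chars.strip x) x := by
  have h1 : List.Sublist (PySem.Chars.lstrip x) x := List.dropWhile_sublist _
  have h2 : List.Sublist (PySem.Chars.strip x) (PySem.Chars.lstrip x) := by
    have := (List.dropWhile_sublist (l := (PySem.Chars.lstrip x).reverse)
      PySem.Chars.isspace).reverse
    simpa using this
  exact h2.trans h1

theorem pv_rstrip_prefix (x : List Char) : PySem.Chars.rstrip x <+: x := by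
  obtain ⟨w, hx, -⟩ := pv_rstrip_decomp x
  exact ⟨w, hx.symm⟩

-- cancellation at the first colon
theorem pv_colon_cancel : ∀ (a : List Char) (b c d : List Char),
    a ++ ':' :: b = c ++ ':' :: d → ':' ∉ a → ':' ∉ c → a = c := by
  intro a
  induction a with
  | nil =>
    intro b c d h ha hc
    cases c with
    | nil => rfl
    | cons y c' =>
      simp only [List.nil_append, List.cons_append, List.cons.injEq] at h
      exact absurd (by rw [h.1]; exact List.mem_cons_self) hc
  | cons x a' ih =>
    intro b c d h ha hc
    cases c with
    | nil =>
      simp only [List.cons_append, List.nil_append, List.cons.injEq] at h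
      exact absurd (by rw [← h.1]; exact List.mem_cons_self) ha
    | cons y c' =>
      simp only [List.cons_append, List.cons.injEq] at h
      have := ih b c' d h.2 (fun hx => ha (List.mem_cons_of_mem _ hx))
        (fun hx => hc (List.mem_cons_of_mem _ hx))
      rw [h.1, this]

-- ---- characterization of splitOn s [':'] ----

theorem pv_sgo_acc : ∀ (fuel : Nat) (l cur : List Char) (acc : List (List Char)),
    PySem.Chars.splitOn.go [':'] fuel l cur acc =
      acc.reverse ++ PySem.Chars.splitOn.go [':'] fuel l cur [] := by
  intro fuel
  induction fuel with
  | zero => intro l cur acc; simp [PySem.Chars.splitOn.go]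
  | succ f ih =>
    intro l cur acc
    cases l with
    | nil => simp [PySem.Chars.splitOn.go]
    | cons c rest =>
      simp only [PySem.Chars.splitOn.go]
      by_cases hp : [':'].isPrefixOf (c :: rest) = true
      · rw [if_pos hp, if_pos hp, ih _ _ (cur.reverse :: acc), ih _ _ [cur.reverse]]
        simp
      · rw [if_neg hp, if_neg hp, ih]

theorem pv_sgo_nocolon : ∀ (fuel : Nat) (l cur : List Char) (acc : List (List Char)),
    ':' ∉ l →
    PySem.Chars.splitOn.go [':'] fuel l cur acc = ((cur.reverse ++ l) :: acc).reverse := by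
  intro fuel
  induction fuel with
  | zero => intro l cur acc _; simp [PySem.Chars.splitOn.go]
  | succ f ih =>
    intro l cur acc h
    cases l with
    | nil => simp [PySem.Chars.splitOn.go]
    | cons c rest =>
      have hc : c ≠ ':' := fun h' => h (by simp [h'])
      simp only [PySem.Chars.splitOn.go]
      rw [if_neg (by simp [List.isPrefixOf]; exact fun h' => hc h'.symm)]
      rw [ih rest (c :: cur) acc (fun h' => h (List.mem_cons_of_mem _ h'))]
      simp

theorem pv_sgo_colon : ∀ (p : List Char), ':' ∉ p → ∀ (f : Nat) (rest cur : List Char)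
    (acc : List (List Char)),
    PySem.Chars.splitOn.go [':'] (p.length + 1 + f) (p ++ ':' :: rest) cur acc =
      PySem.Chars.splitOn.go [':'] f rest [] ((cur.reverse ++ p) :: acc) := by
  intro p
  induction p with
  | nil =>
    intro _ f rest cur acc
    have harith : ([] : List Char).length + 1 + f = f + 1 := by simp [Nat.add_comm]
    rw [harith]
    simp only [List.nil_append, PySem.Chars.splitOn.go]
    rw [if_pos (by simp [List.isPrefixOf])]
    simp
  | cons c p ih =>
    intro hp f rest cur acc
    have hc : c ≠ ':' := fun h' => hp (by simp [h'])
    have harith : (c :: p).length + 1 + f = (p.length + 1 + f) + 1 := by simp; omega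
    rw [harith]
    simp only [List.cons_append, PySem.Chars.splitOn.go]
    rw [if_neg (by simp [List.isPrefixOf]; exact fun h' => hc h'.symm)]
    rw [ih (fun h' => hp (List.mem_cons_of_mem _ h')) f rest (c :: cur) acc]
    simp

theorem pv_splitOn_nocolon (s : List Char) (h : ':' ∉ s) :
    PySem.Chars.splitOn s [':'] = [s] := by
  unfold PySem.Chars.splitOn
  rw [pv_sgo_nocolon _ _ _ _ h]
  simp

theorem pv_splitOn_colon (p rest : List Char) (hp : ':' ∉ p) :
    PySem.Chars.splitOn (p ++ ':' :: rest) [':'] = p :: PySem.Chars.splitOn rest [':'] := by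
  unfold PySem.Chars.splitOn
  have harith : (p ++ ':' :: rest).length + 1 = p.length + 1 + (rest.length + 1) := by simp; omega
  rw [harith]
  rw [pv_sgo_colon p hp (rest.length + 1) rest [] []]
  rw [pv_sgo_acc]
  simp

theorem pv_first_colon (s : List Char) (h : ':' ∈ s) :
    ∃ p rest, s = p ++ ':' :: rest ∧ ':' ∉ p := by
  induction s with
  | nil => simp at h
  | cons c t ih =>
    by_cases hc : c = ':'
    · exact ⟨[], t, by simp [hc], by simp⟩
    · have ht : ':' ∈ t := by
        rcases List.mem_cons.mp h with h1 | h1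
        · exact absurd h1.symm hc
        · exact h1
      obtain ⟨p, rest, hpr, hp⟩ := ih ht
      refine ⟨c :: p, rest, by simp [hpr], ?_⟩
      intro hx
      rcases List.mem_cons.mp hx with h1 | h1
      · exact hc h1.symm
      · exact hp h1

theorem pv_join_cons (a : List Char) (l : List (List Char)) (h : l ≠ []) :
    PySem.Chars.join [':'] (a :: l) = a ++ ':' :: PySem.Chars.join [':'] l := by
  cases l with
  | nil => exact absurd rfl h
  | cons b t => rw [PySem.Chars.join_cons_cons]; simp

theorem pv_splitOn_parts : ∀ (n : Nat) (s : List Char), s.length ≤ n →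
    PySem.Chars.splitOn s [':'] ≠ [] ∧ (∀ p ∈ PySem.Chars.splitOn s [':'], ':' ∉ p) ∧
      PySem.Chars.join [':'] (PySem.Chars.splitOn s [':']) = s := by
  intro n
  induction n with
  | zero =>
    intro s hs
    have : s = [] := List.eq_nil_of_length_eq_zero (Nat.le_zero.mp hs)
    subst this
    rw [pv_splitOn_nocolon [] (by simp)]
    refine ⟨by simp, by simp, ?_⟩
    rw [PySem.Chars.join_singleton]
  | succ n ih =>
    intro s hs
    by_cases hc : ':' ∈ s
    · obtain ⟨p, rest, rfl, hp⟩ := pv_first_colon s hc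
      have hr : rest.length ≤ n := by simp at hs; omega
      obtain ⟨h1, h2, h3⟩ := ih rest hr
      rw [pv_splitOn_colon p rest hp]
      refine ⟨by simp, ?_, ?_⟩
      · intro q hq
        rcases List.mem_cons.mp hq with h | h
        · rw [h]; exact hp
        · exact h2 q h
      · rw [pv_join_cons p _ h1, h3]
    · rw [pv_splitOn_nocolon s hc]
      refine ⟨by simp, by simpa using hc, ?_⟩
      rw [PySem.Chars.join_singleton]

-- ---- the loop condition on a joined parts list ----

-- forward: if strip(join(p :: ps')) starts with "frozen:" (case-insensitively) then there is a
-- later part and lstrip(p).lower() == "frozen"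
theorem pv_cond_forward (p : List Char) (ps' : List (List Char)) (hp : ':' ∉ p)
    (h : PySem.Chars.lower ((PySem.Chars.strip (PySem.Chars.join [':'] (p :: ps'))).take 7) =
      "frozen:".toList) :
    ps' ≠ [] ∧ PySem.Chars.lower (PySem.Chars.lstrip p) = "frozen".toList := by
  obtain ⟨q, tail, hu, hq6, hns, hqc⟩ :=
    pv_decomp7 _ ((pv_take7_iff _).mp h)
  have hps : ps' ≠ [] := by
    intro hps
    subst hps
    rw [PySem.Chars.join_singleton] at hu h
    have hmem : ':' ∈ PySem.Chars.strip p := by rw [hu]; simp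
    exact hp ((pv_strip_sublist p).mem hmem)
  refine ⟨hps, ?_⟩
  have hjoin := pv_join_cons p ps' hps
  rw [hjoin] at hu h
  have hlpf : ':' ∉ PySem.Chars.lstrip p :=
    fun hx => hp ((List.dropWhile_sublist _).mem hx)
  by_cases hlp : PySem.Chars.lstrip p = []
  · exfalso
    have hw : PySem.Chars.lstrip (p ++ ':' :: PySem.Chars.join [':'] ps') =
        ':' :: PySem.Chars.join [':'] ps' := by
      simp only [PySem.Chars.lstrip] at hlp ⊢
      rw [List.dropWhile_append, if_pos (by simp [hlp]), List.dropWhile_cons_of_neg (by decide)]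
    have hstrip : PySem.Chars.strip (p ++ ':' :: PySem.Chars.join [':'] ps') =
        PySem.Chars.rstrip (':' :: PySem.Chars.join [':'] ps') := by
      show PySem.Chars.rstrip _ = _
      rw [hw]
    obtain ⟨t, ht⟩ := pv_rstrip_prefix (':' :: PySem.Chars.join [':'] ps')
    rw [← hstrip, hu] at ht
    cases q with
    | nil => simp at hq6
    | cons a q' =>
      simp only [List.cons_append, List.cons.injEq] at ht
      exact hqc (by rw [ht.1]; exact List.mem_cons_self)
  · have hw : PySem.Chars.lstrip (p ++ ':' :: PySem.Chars.join [':'] ps') =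
        PySem.Chars.lstrip p ++ ':' :: PySem.Chars.join [':'] ps' := by
      simp only [PySem.Chars.lstrip] at hlp ⊢
      rw [List.dropWhile_append, if_neg (by simpa using hlp)]
    have hstrip : PySem.Chars.strip (p ++ ':' :: PySem.Chars.join [':'] ps') =
        PySem.Chars.rstrip (PySem.Chars.lstrip p ++ ':' :: PySem.Chars.join [':'] ps') := by
      show PySem.Chars.rstrip _ = _
      rw [hw]
    obtain ⟨t, ht⟩ := pv_rstrip_prefix (PySem.Chars.lstrip p ++ ':' :: PySem.Chars.join [':'] ps')
    rw [← hstrip, hu] at ht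
    rw [List.append_assoc, List.cons_append] at ht
    have hqeq : q = PySem.Chars.lstrip p := pv_colon_cancel q _ _ _ ht hqc hlpf
    have htake : (PySem.Chars.strip (p ++ ':' :: PySem.Chars.join [':'] ps')).take 7 =
        q ++ [':'] := by
      rw [hu, show q ++ ':' :: tail = (q ++ [':']) ++ tail by simp,
        List.take_left' (by simp [hq6])]
    rw [htake] at h
    have : PySem.Chars.lower q ++ [':'] = "frozen".toList ++ [':'] := by
      have hcol : PySem.Chars.lower [':'] = [':'] := by decide
      have hl : PySem.Chars.lower (q ++ [':']) = PySem.Chars.lower q ++ [':'] := by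
        simp only [PySem.Chars.lower] at hcol ⊢
        rw [List.map_append, hcol]
      rw [← hl, h, show ("frozen:".toList : List Char) = "frozen".toList ++ [':'] from by decide]
    rw [← hqeq]
    exact List.append_inj_left' this rfl

-- backward: the decomposition of strip(join(p :: ps')) when the condition holds
theorem pv_cond_backward (p : List Char) (ps' : List (List Char)) (hps : ps' ≠ [])
    (hq : PySem.Chars.lower (PySem.Chars.lstrip p) = "frozen".toList) :
    PySem.Chars.strip (PySem.Chars.join [':'] (p :: ps')) =
      PySem.Chars.lstrip p ++ ':' :: PySem.Chars.rstrip (PySem.Chars.join [':'] ps') := by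
  have hq6 : (PySem.Chars.lstrip p).length = 6 := by
    have := congrArg List.length hq
    simpa [PySem.Chars.lower] using this
  have hlp : PySem.Chars.lstrip p ≠ [] := by
    intro h
    rw [h] at hq6
    simp at hq6
  rw [pv_join_cons p ps' hps]
  have hw : PySem.Chars.lstrip (p ++ ':' :: PySem.Chars.join [':'] ps') =
      PySem.Chars.lstrip p ++ ':' :: PySem.Chars.join [':'] ps' := by
    simp only [PySem.Chars.lstrip] at hlp ⊢
    rw [List.dropWhile_append, if_neg (by simpa using hlp)]
  have hfix : PySem.Chars.rstrip (PySem.Chars.lstrip p ++ [':']) =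
      PySem.Chars.lstrip p ++ [':'] := by
    simp only [PySem.Chars.rstrip, List.reverse_append]
    rw [show ([':'] : List Char).reverse = [':'] from rfl, List.singleton_append,
      List.dropWhile_cons_of_neg (by decide)]
    simp
  show PySem.Chars.rstrip _ = _
  rw [hw, show PySem.Chars.lstrip p ++ ':' :: PySem.Chars.join [':'] ps' =
    (PySem.Chars.lstrip p ++ [':']) ++ PySem.Chars.join [':'] ps' by simp]
  rw [pv_rstrip_append _ _ hfix]
  simp

-- the condition in take-7 form, from the backward decomposition
theorem pv_cond_true (p : List Char) (ps' : List (List Char)) (hps : ps' ≠ [])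
    (hq : PySem.Chars.lower (PySem.Chars.lstrip p) = "frozen".toList) :
    PySem.Chars.lower ((PySem.Chars.strip (PySem.Chars.join [':'] (p :: ps'))).take 7) =
      "frozen:".toList := by
  have hq6 : (PySem.Chars.lstrip p).length = 6 := by
    have := congrArg List.length hq
    simpa [PySem.Chars.lower] using this
  rw [pv_cond_backward p ps' hps hq,
    show PySem.Chars.lstrip p ++ ':' :: PySem.Chars.rstrip (PySem.Chars.join [':'] ps') =
      (PySem.Chars.lstrip p ++ [':']) ++ PySem.Chars.rstrip (PySem.Chars.join [':'] ps') by simp,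
    List.take_left' (by simp [hq6])]
  have hcol : PySem.Chars.lower [':'] = [':'] := by decide
  have hl : PySem.Chars.lower (PySem.Chars.lstrip p ++ [':']) =
      PySem.Chars.lower (PySem.Chars.lstrip p) ++ [':'] := by
    simp only [PySem.Chars.lower] at hcol ⊢
    rw [List.map_append, hcol]
  rw [hl, hq, show ("frozen".toList ++ [':'] : List Char) = "frozen:".toList from by decide]

-- main loop invariant: A's loop on strip(join parts) = strip(join (parts after dropping the
-- leading "frozen" segments B counts)
theorem pv_mainB : ∀ (ps : List (List Char)), ps ≠ [] → (∀ p ∈ ps, ':' ∉ p) →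
    pvALoop (PySem.Chars.strip (PySem.Chars.join [':'] ps)) =
      PySem.Chars.strip (PySem.Chars.join [':']
        (ps.drop (List.findIdx
          (fun p => !(PySem.Chars.lower (PySem.Chars.lstrip p) == "frozen".toList))
          ps.dropLast))) := by
  intro ps
  induction ps with
  | nil => intro h; exact absurd rfl h
  | cons p ps' ih =>
    intro _ hfree
    have hpf : ':' ∉ p := hfree p List.mem_cons_self
    by_cases hps : ps' = []
    · subst hps
      simp only [List.dropLast_singleton, List.findIdx_nil, List.drop_zero]
      rw [pvALoop.eq_def, dif_neg]
      intro hcond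
      have := pv_cond_forward p [] hpf ((pv_cond_iff _).mp hcond)
      exact this.1 rfl
    · rw [List.dropLast_cons_of_ne_nil hps, List.findIdx_cons]
      by_cases hP : PySem.Chars.lower (PySem.Chars.lstrip p) = "frozen".toList
      · have hb : (!(PySem.Chars.lower (PySem.Chars.lstrip p) == "frozen".toList)) = false := by
          simp [hP]
        rw [hb]
        simp only [cond_false]
        rw [List.drop_succ_cons]
        have hcond := pv_cond_true p ps' hps hP
        rw [pvALoop.eq_def, dif_pos ((pv_cond_iff _).mpr hcond)]
        obtain ⟨hstep, -⟩ := pv_aStep _ hcond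
        rw [hstep]
        have hdrop : (PySem.Chars.strip (PySem.Chars.join [':'] (p :: ps'))).drop 7 =
            PySem.Chars.rstrip (PySem.Chars.join [':'] ps') := by
          rw [pv_cond_backward p ps' hps hP]
          have hq6 : (PySem.Chars.lstrip p).length = 6 := by
            have := congrArg List.length hP
            simpa [PySem.Chars.lower] using this
          rw [show PySem.Chars.lstrip p ++ ':' :: PySem.Chars.rstrip (PySem.Chars.join [':'] ps') =
            (PySem.Chars.lstrip p ++ [':']) ++ PySem.Chars.rstrip (PySem.Chars.join [':'] ps')
            by simp]
          rw [List.drop_left' (by simp [hq6])]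
        rw [hdrop, pv_strip_rstrip]
        exact ih hps (fun q hq => hfree q (List.mem_cons_of_mem _ hq))
      · have hb : (!(PySem.Chars.lower (PySem.Chars.lstrip p) == "frozen".toList)) = true := by
          rw [Bool.not_eq_true', beq_eq_false_iff_ne]
          exact hP
        rw [hb]
        simp only [cond_true, List.drop_zero]
        rw [pvALoop.eq_def, dif_neg]
        intro hcond
        exact hP (pv_cond_forward p ps' hpf ((pv_cond_iff _).mp hcond)).2

-- ===== VERDICT (by name: the statement is the Claim_ definition above) =====
theorem normalize_freeze_reason_py_spec : Claim_equal_normalize_freeze_reason_py := by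
  intro reason _
  unfold Spec_normalize_freeze_reason_py
  obtain ⟨hne, hfree, hjoin⟩ := pv_splitOn_parts reason.toList.length reason.toList le_rfl
  have hmain := pv_mainB (PySem.Chars.splitOn reason.toList [':']) hne hfree
  rw [hjoin] at hmain
  simp only [normalize_freeze_reason_py, normalize_freeze_reason_py_alt, hmain]
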